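-- pv_equiv track=rewrite | github.com/saldigioia/wayback-archive-plugin | wayback-archive/scripts/import_cache.py | derive_url_from_filename
-- ===== SOURCE A (Python) =====
-- def derive_url_from_filename(filename: str, known_domains: list[str]) -> str | None:
--     """Best-effort filename → URL reverse. Works for the `_safe_filename`
--     shape on unhashed names where the filename starts with a known host.
--     """
--     stem = filename
--     if stem.endswith(".html"):
--         stem = stem[: -len(".html")]
--
--     # Try longest-domain-first so www.foo.com matches before foo.com
--     for domain in sorted(known_domains, key=len, reverse=True):
--         prefix = domain + "_"
--         if stem.lower().startswith(prefix.lower()):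
--             path_part = stem[len(prefix):]
--             # Filenames use `_` for `/`; Shopify slugs use `-`, so the
--             # replacement is generally safe for Shopify-shape paths.
--             return f"https://{domain}/{path_part.replace('_', '/')}"
--     return None
-- ===== SOURCE B (Python) =====
-- def derive_url_from_filename(filename: str, known_domains: list[str]) -> str | None:
--     """Single pass over known_domains keeping the longest matching domain
--     (first one wins on equal length) instead of sorting per call."""
--     stem = filename[: -len(".html")] if filename.endswith(".html") else filename
--     stem_l = stem.lower()
--     best = None
--     for domain in known_domains:
--         if (best is None or len(domain) > len(best)) and stem_l.startswith((domain + "_").lower()):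
--             best = domain
--     if best is None:
--         return None
--     path_part = stem[len(best) + 1:]
--     return f"https://{best}/{path_part.replace('_', '/')}"
-- ===== Notes on version B (the rewrite author's own statement) =====
-- stated objective: faster
-- what changed: Replaces the per-call sort of known_domains by a single linear scan that keeps the longest matching domain (strict > so the first domain wins on length ties), then builds the URL once from that best match.
import Mathlib
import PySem

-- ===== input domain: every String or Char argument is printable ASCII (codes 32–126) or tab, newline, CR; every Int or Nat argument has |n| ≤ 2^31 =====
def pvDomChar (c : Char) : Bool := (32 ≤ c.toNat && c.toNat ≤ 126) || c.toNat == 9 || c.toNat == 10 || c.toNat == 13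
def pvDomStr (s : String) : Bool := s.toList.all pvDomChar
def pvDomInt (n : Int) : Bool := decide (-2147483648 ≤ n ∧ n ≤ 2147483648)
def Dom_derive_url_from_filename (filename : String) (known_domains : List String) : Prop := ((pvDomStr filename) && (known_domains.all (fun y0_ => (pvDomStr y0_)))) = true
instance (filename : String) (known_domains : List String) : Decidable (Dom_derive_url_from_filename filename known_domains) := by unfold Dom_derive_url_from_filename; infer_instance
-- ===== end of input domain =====

-- B replaces A's per-call length-sort by one linear scan keeping the longest matching domain (simpler).

-- ===== PORT A =====
-- the for-loop over the sorted list: return at the first matching domain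
def pvLoopA (stem : String) : List String → Option String
  | [] => none
  | domain :: rest =>
    let pre := domain ++ "_"
    if PySem.Str.startswith (PySem.Str.lower stem) (PySem.Str.lower pre) then
      some ("https://" ++ domain ++ "/" ++
        PySem.Str.replace (PySem.Str.slice stem (some (PySem.Str.len pre)) none) "_" "/")
    else pvLoopA stem rest

def derive_url_from_filename (filename : String) (known_domains : List String) : Option String :=
  let stem := if PySem.Str.endswith filename ".html" then PySem.Str.slice filename none (some (-5)) else filename
  pvLoopA stem (PySem.List.sorted known_domains (fun d => PySem.Str.len d) true)

-- ===== PORT B =====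
-- loop body: keep `best` only when the candidate is strictly longer and matches
def pvStepB (stem_l : String) (best : Option String) (domain : String) : Option String :=
  if ((match best with | none => true | some b => decide (PySem.Str.len b < PySem.Str.len domain))
      && PySem.Str.startswith stem_l (PySem.Str.lower (domain ++ "_"))) then some domain else best

def derive_url_from_filename_alt (filename : String) (known_domains : List String) : Option String :=
  let stem := if PySem.Str.endswith filename ".html" then PySem.Str.slice filename none (some (-5)) else filename
  let stem_l := PySem.Str.lower stem
  match known_domains.foldl (pvStepB stem_l) none with
  | none => none
  | some best =>
      some ("https://" ++ best ++ "/" ++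
        PySem.Str.replace (PySem.Str.slice stem (some (PySem.Str.len best + 1)) none) "_" "/")

-- ===== PRECONDITION & SPEC =====
def Spec_derive_url_from_filename (filename : String) (known_domains : List String) (out : Option String) : Prop := out = derive_url_from_filename_alt filename known_domains
instance (filename : String) (known_domains : List String) (out : Option String) : Decidable (Spec_derive_url_from_filename filename known_domains out) := by unfold Spec_derive_url_from_filename; infer_instance

-- ===== CLAIM (what is proved, stated in full; the proofs are below) =====
def Claim_equal_derive_url_from_filename : Prop := ∀ (filename : String) (known_domains : List String), Dom_derive_url_from_filename filename known_domains → Spec_derive_url_from_filename filename known_domains (derive_url_from_filename filename known_domains)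

-- ===== LEMMAS AND PROOFS =====

-- A's loop is find? of the match predicate, mapped through the URL builder
theorem pvLoopA_eq_find (stem : String) (ys : List String) :
    pvLoopA stem ys =
      (ys.find? (fun d => PySem.Str.startswith (PySem.Str.lower stem) (PySem.Str.lower (d ++ "_")))).map
        (fun d => "https://" ++ d ++ "/" ++
          PySem.Str.replace (PySem.Str.slice stem (some (PySem.Str.len (d ++ "_"))) none) "_" "/") := by
  induction ys with
  | nil => rfl
  | cons y ys ih =>
    cases h : PySem.Str.startswith (PySem.Str.lower stem) (PySem.Str.lower (y ++ "_")) with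
    | true => simp only [pvLoopA, List.find?, h, Option.map_some, if_true]
    | false => simp only [pvLoopA, List.find?, h, ih, Bool.false_eq_true, if_false]

-- insertBy for the reverse order keeps the "keys weakly decreasing" invariant
theorem pvInsertBy_pairwise (key : String → Int) (x : String) (acc : List String)
    (h : acc.Pairwise (fun a b => key b ≤ key a)) :
    (PySem.List.insertBy (fun a b => decide (key b < key a)) x acc).Pairwise
      (fun a b => key b ≤ key a) := by
  induction acc with
  | nil => simp [PySem.List.insertBy]
  | cons y acc ih =>
    rcases List.pairwise_cons.mp h with ⟨hy, htail⟩
    simp only [PySem.List.insertBy]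
    by_cases hlt : key y < key x
    · simp only [hlt, decide_true, if_pos]
      refine List.pairwise_cons.mpr ⟨?_, h⟩
      intro z hz
      rcases List.mem_cons.mp hz with rfl | hz
      · omega
      · have := hy z hz; omega
    · simp only [hlt, decide_false, Bool.false_eq_true, if_neg, not_false_eq_true]
      refine List.pairwise_cons.mpr ⟨?_, ih htail⟩
      intro z hz
      rcases (PySem.List.mem_insertBy _ _ _ _).mp hz with rfl | hz
      · omega
      · exact hy z hz

-- find? after inserting x into a weakly-decreasing acc = one step of the best-tracking fold
theorem pvFind_insertBy (p : String → Bool) (key : String → Int) (x : String) (acc : List String)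
    (h : acc.Pairwise (fun a b => key b ≤ key a)) :
    (PySem.List.insertBy (fun a b => decide (key b < key a)) x acc).find? p =
      (if ((match acc.find? p with | none => true | some b => decide (key b < key x)) && p x)
        then some x else acc.find? p) := by
  induction acc with
  | nil =>
    cases hp : p x <;> simp [PySem.List.insertBy, List.find?, hp]
  | cons y acc ih =>
    rcases List.pairwise_cons.mp h with ⟨hy, htail⟩
    simp only [PySem.List.insertBy]
    by_cases hlt : key y < key x
    · simp only [hlt, decide_true, if_pos, List.find?]
      cases hp : p x
      · cases hpy : p y <;> simp
      · cases hpy : p y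
        · cases hf : acc.find? p with
          | none => simp
          | some m =>
            have hm : m ∈ acc := List.mem_of_find?_eq_some hf
            have h1 : key m ≤ key y := hy m hm
            have h2 : key m < key x := by omega
            simp [h2]
        · have h3 : key y < key x := hlt
          simp [h3]
    · simp only [hlt, decide_false, Bool.false_eq_true, if_neg, not_false_eq_true, List.find?]
      cases hpy : p y
      · simp only [ih htail]
      · have hxy : decide (key y < key x) = false := by simpa using hlt
        simp [hxy]

-- the generalized loop invariant
theorem pvFind_foldl (p : String → Bool) (key : String → Int) (ys acc : List String)
    (h : acc.Pairwise (fun a b => key b ≤ key a)) :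
    ((ys.foldl (fun acc x => PySem.List.insertBy (fun a b => decide (key b < key a)) x acc) acc).find? p) =
      ys.foldl (fun best x =>
        if ((match best with | none => true | some b => decide (key b < key x)) && p x)
          then some x else best) (acc.find? p) := by
  induction ys generalizing acc with
  | nil => rfl
  | cons x ys ih =>
    simp only [List.foldl_cons]
    rw [ih _ (pvInsertBy_pairwise key x acc h), pvFind_insertBy p key x acc h]

-- first match of the reverse length-sort = best-tracking single pass
theorem pvFind_sorted (p : String → Bool) (ys : List String) :
    ((PySem.List.sorted ys (fun d => PySem.Str.len d) true).find? p) =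
      ys.foldl (fun best x =>
        if ((match best with | none => true | some b => decide (PySem.Str.len b < PySem.Str.len x)) && p x)
          then some x else best) none := by
  rw [PySem.List.sorted_rev_eq_foldl_insertBy]
  exact pvFind_foldl p (fun d => PySem.Str.len d) ys [] (by simp)

-- the fold of pvFind_sorted, with the predicate plugged in, IS B's loop over pvStepB
theorem pvFind_sorted_step (stem_l : String) (ys : List String) :
    ((PySem.List.sorted ys (fun d => PySem.Str.len d) true).find?
        (fun d => PySem.Str.startswith stem_l (PySem.Str.lower (d ++ "_")))) =
      ys.foldl (pvStepB stem_l) none := by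
  rw [pvFind_sorted]; rfl


-- ===== VERDICT (by name: the statement is the Claim_ definition above) =====
theorem derive_url_from_filename_spec : Claim_equal_derive_url_from_filename := by
  intro filename known_domains _hdom
  unfold Spec_derive_url_from_filename derive_url_from_filename derive_url_from_filename_alt
  rw [pvLoopA_eq_find, pvFind_sorted_step]
  cases hf : known_domains.foldl
      (pvStepB (PySem.Str.lower (if PySem.Str.endswith filename ".html" = true then
        PySem.Str.slice filename none (some (-5)) else filename))) none with
  | none => simp at hf ⊢; simp [hf]
  | some best => simp at hf ⊢; simp [hf]
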